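-- pv_equiv track=rewrite | github.com/gerrymandr/trees | ZDD/enumpart_helpers.py | se_diag
-- ===== SOURCE A (Python) =====
-- def se_diag(x,y,x_max,y_max):
--     edge_list = []
--     while y > 0 and x < x_max:
--         edge_list = edge_list + [((x,y),(x,y-1)),((x,y-1),(x+1,y-1))]
--         x,y = x + 1, y - 1
--     if y > 0:
--         edge_list = edge_list + [((x,y),(x,y-1))]
--     return edge_list
-- ===== SOURCE B (Python) =====
-- def se_diag(x, y, x_max, y_max):
--     n = max(0, min(y, x_max - x))
--     path = [(x + i // 2, y - (i + 1) // 2) for i in range(2 * n + 1)]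
--     if y > n:
--         path.append((x + n, y - n - 1))
--     return list(zip(path, path[1:]))
-- ===== Notes on version B (the rewrite author's own statement) =====
-- stated objective: alternative
-- what changed: Instead of emitting edges while walking (x,y) south-east, B computes the vertex walk of the staircase from a closed-form index formula (plus one guarded trailing vertex) and pairs consecutive vertices with zip(path, path[1:]) to get the edges.
import Mathlib
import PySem

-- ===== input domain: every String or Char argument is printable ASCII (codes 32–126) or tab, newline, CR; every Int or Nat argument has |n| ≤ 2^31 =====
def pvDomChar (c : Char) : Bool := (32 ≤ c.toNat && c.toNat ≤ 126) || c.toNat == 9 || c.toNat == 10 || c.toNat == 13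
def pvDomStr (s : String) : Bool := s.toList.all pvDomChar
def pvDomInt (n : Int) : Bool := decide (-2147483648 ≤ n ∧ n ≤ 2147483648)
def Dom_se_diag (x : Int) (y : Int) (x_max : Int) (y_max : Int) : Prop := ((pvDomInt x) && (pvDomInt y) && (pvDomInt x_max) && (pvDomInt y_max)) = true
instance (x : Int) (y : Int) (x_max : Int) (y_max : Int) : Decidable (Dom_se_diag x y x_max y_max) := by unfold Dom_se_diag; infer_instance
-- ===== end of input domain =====

-- B replaces A's edge-emitting while loop by building the vertex walk with a closed-form
-- index formula and pairing consecutive vertices with zip; objective: alternative.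


-- ===== PORT A =====
-- the while loop of A: state (x, y, edge_list); after it, the trailing `if` and return
def seLoopA (x y x_max : Int) (acc : List ((Int × Int) × (Int × Int))) :
    List ((Int × Int) × (Int × Int)) :=
  if h : 0 < y ∧ x < x_max then
    seLoopA (x + 1) (y - 1) x_max
      (acc ++ [((x, y), (x, y - 1)), ((x, y - 1), (x + 1, y - 1))])
  else if 0 < y then acc ++ [((x, y), (x, y - 1))] else acc
termination_by y.toNat
decreasing_by omega

def se_diag (x : Int) (y : Int) (x_max : Int) (y_max : Int) : List ((Int × Int) × (Int × Int)) :=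
  seLoopA x y x_max []

-- ===== PORT B =====
def se_diag_alt (x : Int) (y : Int) (x_max : Int) (y_max : Int) : List ((Int × Int) × (Int × Int)) :=
  let n : Int := max 0 (min y (x_max - x))
  let path := (List.range (2 * n.toNat + 1)).map
      (fun (i : Nat) => (x + ((i / 2 : Nat) : Int), y - (((i + 1) / 2 : Nat) : Int)))
  let path' := if n < y then path ++ [(x + n, y - n - 1)] else path
  path'.zip (path'.drop 1)

-- ===== PRECONDITION & SPEC =====
def Spec_se_diag (x : Int) (y : Int) (x_max : Int) (y_max : Int) (out : List ((Int × Int) × (Int × Int))) : Prop := out = se_diag_alt x y x_max y_max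
instance (x : Int) (y : Int) (x_max : Int) (y_max : Int) (out : List ((Int × Int) × (Int × Int))) : Decidable (Spec_se_diag x y x_max y_max out) := by unfold Spec_se_diag; infer_instance

-- ===== CLAIM (what is proved, stated in full; the proofs are below) =====
def Claim_equal_se_diag : Prop := ∀ (x : Int) (y : Int) (x_max : Int) (y_max : Int), Dom_se_diag x y x_max y_max → Spec_se_diag x y x_max y_max (se_diag x y x_max y_max)

-- ===== LEMMAS AND PROOFS =====

-- proof-side name for B's vertex walk (the `path'` of se_diag_alt)
def pathOf (x y x_max : Int) : List (Int × Int) :=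
  let n : Int := max 0 (min y (x_max - x))
  let path := (List.range (2 * n.toNat + 1)).map
      (fun (i : Nat) => (x + ((i / 2 : Nat) : Int), y - (((i + 1) / 2 : Nat) : Int)))
  if n < y then path ++ [(x + n, y - n - 1)] else path

lemma alt_eq_path (x y x_max y_max : Int) :
    se_diag_alt x y x_max y_max = (pathOf x y x_max).zip ((pathOf x y x_max).drop 1) := rfl

-- pairing consecutive elements, peeled one cons at a time
lemma zip_drop_cons_cons {a : Type} (u v : a) (l : List a) :
    ((u :: v :: l).zip ((u :: v :: l).drop 1)) = (u, v) :: ((v :: l).zip ((v :: l).drop 1)) := by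
  simp [List.zip]

-- the vertex walk starts at (x, y)
lemma path_cons (x y x_max : Int) :
    ∃ rest, pathOf x y x_max = (x, y) :: rest := by
  simp only [pathOf, List.range_succ_eq_map, List.map_cons]
  norm_num
  split
  · exact ⟨_, rfl⟩
  · exact ⟨_, rfl⟩

-- peeling one diagonal step off the vertex walk when A's loop guard holds
lemma path_step (x y x_max : Int) (hy : 0 < y) (hx : x < x_max) :
    pathOf x y x_max = (x, y) :: (x, y - 1) :: pathOf (x + 1) (y - 1) x_max := by
  simp only [pathOf]
  have hm : (max 0 (min y (x_max - x))).toNat = (max 0 (min (y-1) (x_max - (x+1)))).toNat + 1 := by omega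
  have hmval : max 0 (min y (x_max - x)) = max 0 (min (y-1) (x_max - (x+1))) + 1 := by omega
  set m : Int := max 0 (min (y-1) (x_max - (x+1))) with hmdef
  rw [hm, hmval]
  have hr : 2 * (m.toNat + 1) + 1 = (2 * m.toNat + 1) + 1 + 1 := by ring
  rw [hr, List.range_succ_eq_map, List.range_succ_eq_map]
  simp only [List.map_cons, List.map_map]
  have hfun : ((fun (i : Nat) => (x + ((i / 2 : Nat) : Int), y - (((i + 1) / 2 : Nat) : Int))) ∘ (Nat.succ ∘ Nat.succ))
      = (fun (i : Nat) => ((x+1) + ((i / 2 : Nat) : Int), (y-1) - (((i + 1) / 2 : Nat) : Int))) := by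
    funext i
    simp only [Function.comp, Nat.succ_eq_add_one]
    have h1 : (i + 1 + 1) / 2 = i / 2 + 1 := by omega
    have h2 : (i + 1 + 1 + 1) / 2 = (i + 1) / 2 + 1 := by omega
    rw [h1, h2]
    push_cast
    simp only [Prod.mk.injEq]
    constructor <;> ring
  rw [hfun]
  have he1 : x + (m+1) = x + 1 + m := by ring
  have he2 : y - (m+1) - 1 = y - 1 - m - 1 := by ring
  norm_num
  rw [he1, he2]
  by_cases hmy : m < y - 1
  · rw [if_pos (by omega : m + 1 < y), if_pos hmy]
  · rw [if_neg (by omega : ¬ m + 1 < y), if_neg hmy]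

-- peeling one diagonal step off B when A's loop guard holds
lemma alt_step (x y x_max y_max : Int) (hy : 0 < y) (hx : x < x_max) :
    se_diag_alt x y x_max y_max =
      ((x, y), (x, y - 1)) :: ((x, y - 1), (x + 1, y - 1)) ::
        se_diag_alt (x + 1) (y - 1) x_max y_max := by
  obtain ⟨rest, hrest⟩ := path_cons (x + 1) (y - 1) x_max
  rw [alt_eq_path, alt_eq_path, path_step x y x_max hy hx, hrest,
    zip_drop_cons_cons, zip_drop_cons_cons]

-- when the loop guard fails, B's vertex walk has one or two points
lemma alt_base (x y x_max y_max : Int) (h : ¬ (0 < y ∧ x < x_max)) :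
    se_diag_alt x y x_max y_max =
      if 0 < y then [((x, y), (x, y - 1))] else [] := by
  rw [alt_eq_path]
  simp only [pathOf]
  have hn : max 0 (min y (x_max - x)) = 0 := by omega
  rw [hn]
  norm_num [List.range_succ]
  split <;> simp [List.zip]

-- loop invariant: A's loop result is the accumulator followed by B's value
lemma loop_eq (y : Int) : ∀ (x x_max y_max : Int) (acc : List ((Int × Int) × (Int × Int))),
    seLoopA x y x_max acc = acc ++ se_diag_alt x y x_max y_max := by
  induction' hk : y.toNat using Nat.strong_induction_on with k ih generalizing y
  intro x x_max y_max acc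
  rw [seLoopA]
  by_cases h : 0 < y ∧ x < x_max
  · rw [dif_pos h]
    have hlt : (y - 1).toNat < k := by omega
    rw [ih _ hlt _ rfl (x + 1) x_max y_max, alt_step x y x_max y_max h.1 h.2]
    simp
  · rw [dif_neg h, alt_base x y x_max y_max h]
    split <;> simp

-- ===== VERDICT (by name: the statement is the Claim_ definition above) =====
theorem se_diag_spec : Claim_equal_se_diag := by
  intro x y x_max y_max _
  unfold Spec_se_diag se_diag
  simpa using loop_eq y x x_max y_max []
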